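-- pv_equiv track=rewrite | github.com/ArchDiver/codewars | codesignal.py | alternatingSort
-- ===== SOURCE A (Python) =====
-- def alternatingSort(a):
--     b, x = 0, a[0]
--     while b != (len(a)-1)//2:
--         if b < 0:
--             b=-b
--         else:
--             b = -b-1
--         if a[b] < x:
--             return False
--         x = a[b]
--     return True
-- ===== SOURCE B (Python) =====
-- def alternatingSort(a):
--     seq = [a[0]]
--     left, right = 1, len(a) - 1
--     while left < right:
--         seq.append(a[right])
--         seq.append(a[left])
--         left += 1
--         right -= 1
--     return all(not (seq[i + 1] < seq[i]) for i in range(len(seq) - 1))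
-- ===== Notes on version B (the rewrite author's own statement) =====
-- stated objective: alternative
-- what changed: B first materialises the interleaved sequence a[0],a[-1],a[1],a[-2],... with a two-pointer build loop and then separately scans adjacent pairs for order, instead of A's single loop that flips the sign of one index while comparing on the fly.
import Mathlib
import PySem

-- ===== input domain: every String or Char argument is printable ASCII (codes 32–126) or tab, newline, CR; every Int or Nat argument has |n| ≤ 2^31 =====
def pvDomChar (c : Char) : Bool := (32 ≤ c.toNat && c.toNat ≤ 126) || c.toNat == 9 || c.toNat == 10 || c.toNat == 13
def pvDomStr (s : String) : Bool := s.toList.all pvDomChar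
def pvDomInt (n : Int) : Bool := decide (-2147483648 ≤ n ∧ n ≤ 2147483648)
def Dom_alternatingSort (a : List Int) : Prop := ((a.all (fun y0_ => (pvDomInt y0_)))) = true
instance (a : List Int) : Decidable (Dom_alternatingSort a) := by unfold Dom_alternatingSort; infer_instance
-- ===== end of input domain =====

-- B rebuilds the interleaved sequence with a two-pointer loop and then checks order in a separate scan, instead of A's single sign-flipping-index loop (alternative decomposition, same cost).

-- ===== PORT A =====
-- A's while loop; fuel = a.length is enough (the loop runs 2*((len-1)//2) ≤ len-1 times, proved below)
def altLoopA (a : List Int) : Nat → Int → Int → Bool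
  | 0, _, _ => true            -- fuel exhausted: unreachable with fuel = a.length
  | fuel+1, b, x =>
    if b = PySem.Int.floordiv ((a.length : Int) - 1) 2 then true
    else
      let b' : Int := if b < 0 then -b else -b - 1
      match PySem.List.pyGet? a b' with
      | none => false          -- IndexError: unreachable for the states the loop visits
      | some v => if v < x then false else altLoopA a fuel b' v

def alternatingSort (a : List Int) : Bool :=
  match PySem.List.pyGet? a 0 with
  | none => false              -- a[0] raises IndexError on []: excluded by Pre_
  | some x => altLoopA a a.length 0 x

-- ===== PORT B =====
-- Source B's two-pointer build loop; fuel = a.length is enough (right - left shrinks by 2 per step, proved below)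
def buildB (a : List Int) : Nat → Int → Int → List Int → List Int
  | 0, _, _, seq => seq        -- fuel exhausted: unreachable with fuel = a.length
  | fuel+1, left, right, seq =>
    if left < right then
      buildB a fuel (left + 1) (right - 1)
        (seq ++ [(PySem.List.pyGet? a right).getD 0, (PySem.List.pyGet? a left).getD 0])
    else seq

def alternatingSort_alt (a : List Int) : Bool :=
  match PySem.List.pyGet? a 0 with
  | none => false              -- a[0] raises IndexError on []: excluded by Pre_
  | some x =>
    let seq := buildB a a.length 1 ((a.length : Int) - 1) [x]
    (List.range (seq.length - 1)).all fun i =>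
      !decide (seq.getD (i + 1) 0 < seq.getD i 0)

-- ===== PRECONDITION & SPEC =====
-- A evaluates a[0] before the loop, so the empty list raises IndexError; every other list returns.
def Pre_alternatingSort (a : List Int) : Prop := a ≠ []
instance (a : List Int) : Decidable (Pre_alternatingSort a) := by unfold Pre_alternatingSort; infer_instance
def pvWitness_alternatingSort : List Int := [1, 5, 2]

def Spec_alternatingSort (a : List Int) (out : Bool) : Prop := out = alternatingSort_alt a
instance (a : List Int) (out : Bool) : Decidable (Spec_alternatingSort a out) := by unfold Spec_alternatingSort; infer_instance

-- ===== CLAIM (what is proved, stated in full; the proofs are below) =====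
def Claim_equal_alternatingSort : Prop := ∀ (a : List Int), Dom_alternatingSort a → Pre_alternatingSort a → Spec_alternatingSort a (alternatingSort a)

-- ===== LEMMAS AND PROOFS =====

-- the interleaved tail a[right], a[left], a[right-1], a[left+1], … (proof helper)
def buildTail (a : List Int) (left right : Int) : List Int :=
  if left < right then
    (PySem.List.pyGet? a right).getD 0 :: (PySem.List.pyGet? a left).getD 0 ::
      buildTail a (left + 1) (right - 1)
  else []
termination_by (right - left).toNat
decreasing_by omega

-- adjacent-pair order check (proof helper: both ports reduce to it)
def pairCheck : List Int → Bool
  | x :: y :: r => if y < x then false else pairCheck (y :: r)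
  | _ => true

lemma pairCheck_cons₂ (x y : Int) (r : List Int) :
    pairCheck (x :: y :: r) = if y < x then false else pairCheck (y :: r) := rfl

lemma buildB_eq_append (a : List Int) :
    ∀ (fuel : Nat) (left right : Int) (seq : List Int), (right - left).toNat ≤ fuel →
      buildB a fuel left right seq = seq ++ buildTail a left right := by
  intro fuel
  induction fuel with
  | zero =>
      intro left right seq h
      rw [buildB, buildTail, if_neg (by omega)]
      simp
  | succ fuel ih =>
      intro left right seq h
      by_cases hlr : left < right
      · rw [buildB, buildTail, if_pos hlr, if_pos hlr, ih _ _ _ (by omega)]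
        simp
      · rw [buildB, buildTail, if_neg hlr, if_neg hlr]
        simp

lemma rangeAll_eq_pairCheck (l : List Int) :
    ((List.range (l.length - 1)).all fun i =>
      !decide (l.getD (i + 1) 0 < l.getD i 0)) = pairCheck l := by
  match l with
  | [] => simp [pairCheck]
  | [x] => simp [pairCheck]
  | x :: y :: r =>
      have := rangeAll_eq_pairCheck (y :: r)
      rw [pairCheck]
      simp only [List.length_cons, Nat.add_sub_cancel, List.range_succ_eq_map,
        List.all_cons, List.all_map]
      by_cases h : y < x
      · simp [h]
      · simp only [h, if_false]
        rw [← this]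
        simp only [List.length_cons, Nat.add_sub_cancel]
        have hfun :
            ((fun i => !decide ((x :: y :: r).getD (i + 1) 0 < (x :: y :: r).getD i 0)) ∘ Nat.succ)
              = (fun i => !decide ((y :: r).getD (i + 1) 0 < (y :: r).getD i 0)) := by
          funext i
          simp
        rw [hfun]
        simp [h]

-- the loop of A, from state b = j with current value x, performs exactly the
-- adjacent-pair checks of the interleaved tail starting at positions (j+1, len-1-j)
lemma altLoop_eq (a : List Int) (ha : a ≠ []) :
    ∀ (fuel : Nat), ∀ (j : Nat) (x : Int), j ≤ (a.length - 1) / 2 →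
      2 * ((a.length - 1) / 2 - j) < fuel →
    altLoopA a fuel (j : Int) x
      = pairCheck (x :: buildTail a ((j : Int) + 1) ((a.length : Int) - 1 - (j : Int))) := by
  intro fuel
  induction fuel using Nat.strong_induction_on with
  | _ fuel ih =>
    intro j x hj hf
    have hn : 1 ≤ a.length := List.length_pos_of_ne_nil ha
    have htI : PySem.Int.floordiv ((a.length : Int) - 1) 2 = (((a.length - 1) / 2 : Nat) : Int) := by
      rw [show ((a.length : Int) - 1) = ((a.length - 1 : Nat) : Int) by push_cast [hn]; omega]
      exact_mod_cast PySem.Int.floordiv_natCast (a.length - 1) 2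
    by_cases hjt : j = (a.length - 1) / 2
    · -- loop exits immediately; the two-pointer region is empty as well
      obtain ⟨f, rfl⟩ : ∃ f, fuel = f + 1 := ⟨fuel - 1, by omega⟩
      rw [altLoopA, htI, if_pos (by exact_mod_cast hjt)]
      rw [buildTail, if_neg (by omega)]
      rfl
    · -- loop takes two steps (checks a[-(j+1)] then a[j+1]), matching one build iteration
      have hjt' : j < (a.length - 1) / 2 := lt_of_le_of_ne hj hjt
      obtain ⟨f, rfl⟩ : ∃ f, fuel = f + 2 := ⟨fuel - 2, by omega⟩
      have h2j : 2 * j + 2 < a.length := by omega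
      have hneg : PySem.List.pyGet? a (-(j : Int) - 1)
          = some (a[a.length - 1 - j]'(by omega)) := by
        rw [show (-(j : Int) - 1) = -(((j + 1 : Nat)) : Int) by push_cast; ring]
        rw [PySem.List.pyGet?_neg_natCast a (j + 1) (by omega) (by omega)]
        rw [show a.length - (j + 1) = a.length - 1 - j by omega]
        exact List.getElem?_eq_getElem (by omega)
      have hpos : PySem.List.pyGet? a ((j : Int) + 1)
          = some (a[j + 1]'(by omega)) := by
        rw [show ((j : Int) + 1) = (((j + 1 : Nat)) : Int) by push_cast; ring]
        rw [PySem.List.pyGet?_natCast a (j + 1)]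
        exact List.getElem?_eq_getElem (by omega)
      have hposR : PySem.List.pyGet? a ((a.length : Int) - 1 - (j : Int))
          = some (a[a.length - 1 - j]'(by omega)) := by
        rw [show ((a.length : Int) - 1 - (j : Int)) = ((a.length - 1 - j : Nat) : Int) by
          omega]
        rw [PySem.List.pyGet?_natCast a (a.length - 1 - j)]
        exact List.getElem?_eq_getElem (by omega)
      rw [altLoopA, htI, if_neg (by exact_mod_cast hjt)]
      rw [if_neg (show ¬((j : Int) < 0) by omega)]
      dsimp only
      rw [hneg]
      rw [buildTail, if_pos (by omega), hposR, hpos]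
      simp only [Option.getD_some]
      rw [pairCheck_cons₂]
      by_cases hvx : a[a.length - 1 - j]'(by omega) < x
      · simp [hvx]
      · simp only [hvx, if_false]
        rw [altLoopA, htI, if_neg (by push_cast; omega)]
        rw [if_pos (show (-(j : Int) - 1) < 0 by omega)]
        dsimp only
        rw [show -(-(j : Int) - 1) = ((j : Int) + 1) by ring, hpos]
        rw [pairCheck_cons₂]
        by_cases hwv : a[j + 1]'(by omega) < a[a.length - 1 - j]'(by omega)
        · simp [hwv]
        · simp only [hwv, if_false]
          have hIH := ih f (by omega) (j + 1) (a[j + 1]'(by omega)) (by omega) (by omega)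
          rw [show ((j : Int) + 1) = (((j + 1 : Nat)) : Int) by push_cast; ring] at *
          rw [show ((a.length : Int) - 1 - (j : Int) - 1)
                = ((a.length : Int) - 1 - ((j + 1 : Nat) : Int)) by push_cast; ring, hIH]

-- ===== VERDICT (by name: the statement is the Claim_ definition above) =====
theorem alternatingSort_spec : Claim_equal_alternatingSort := by
  intro a _ ha
  unfold Spec_alternatingSort alternatingSort alternatingSort_alt
  obtain ⟨x, tl, rfl⟩ : ∃ x tl, a = x :: tl := by
    cases a with
    | nil => exact absurd rfl ha
    | cons x tl => exact ⟨x, tl, rfl⟩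
  rw [PySem.List.pyGet?_zero_cons]
  dsimp only
  rw [buildB_eq_append (x :: tl) (x :: tl).length 1 ((↑(x :: tl).length : Int) - 1) [x]
        (by simp only [List.length_cons]; omega),
      rangeAll_eq_pairCheck, List.singleton_append]
  have h := altLoop_eq (x :: tl) (by simp) (x :: tl).length 0 x (by omega)
    (by simp only [List.length_cons]; omega)
  simp only [Nat.cast_zero, zero_add, sub_zero] at h
  exact h
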